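-- pv_equiv track=rewrite | github.com/M1ngos/repensar-multiplatform-backend | alembic/versions/013_create_activity_log_partitions_2026_2027.py | _monthly_partitions
-- ===== SOURCE A (Python) =====
-- def _monthly_partitions(year: int) -> list[tuple[str, str, str]]:
--     """Return (partition_name, from_date, to_date) tuples for every month of *year*."""
--     partitions = []
--     for month in range(1, 13):
--         next_month = month + 1
--         next_year = year
--         if next_month > 12:
--             next_month = 1
--             next_year = year + 1
--         name = f"activity_logs_y{year}m{month:02d}"
--         from_date = f"{year}-{month:02d}-01"
--         to_date = f"{next_year}-{next_month:02d}-01"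
--         partitions.append((name, from_date, to_date))
--     return partitions
-- ===== SOURCE B (Python) =====
-- def _monthly_partitions(year: int) -> list[tuple[str, str, str]]:
--     """Return (partition_name, from_date, to_date) tuples for every month of *year*."""
--     def build(month, upper, acc):
--         # Recurse from December down to January, carrying each month's start
--         # as the next (lower) month's upper boundary; build the list back-to-front.
--         if month == 0:
--             return acc
--         start = f"{year}-{month:02d}-01"
--         entry = (f"activity_logs_y{year}m{month:02d}", start, upper)
--         return build(month - 1, start, [entry] + acc)
--     return build(12, f"{year + 1}-01-01", [])
-- ===== Notes on version B (the rewrite author's own statement) =====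
-- stated objective: alternative
-- what changed: Replaces the forward range(1,13) loop with its rollover conditional by a backward recursion from December to January that carries each month's start date as the next lower month's upper boundary and builds the list back-to-front; no next_month/next_year computation exists in B.
import Mathlib
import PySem

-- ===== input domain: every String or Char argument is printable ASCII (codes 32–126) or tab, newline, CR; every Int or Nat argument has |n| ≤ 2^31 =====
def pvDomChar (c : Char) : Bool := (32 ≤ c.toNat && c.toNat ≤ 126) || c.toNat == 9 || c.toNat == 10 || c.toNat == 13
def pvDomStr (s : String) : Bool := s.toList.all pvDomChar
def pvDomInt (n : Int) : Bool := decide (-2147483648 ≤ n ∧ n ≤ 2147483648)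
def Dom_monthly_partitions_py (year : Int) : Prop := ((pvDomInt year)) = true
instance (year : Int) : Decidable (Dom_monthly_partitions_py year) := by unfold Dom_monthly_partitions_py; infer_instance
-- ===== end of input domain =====

-- B replaces the forward loop with rollover conditional by a backward December-to-January
-- recursion carrying the next month's start as the upper boundary (alternative decomposition, same cost).

-- ===== PORT A =====
-- shared helper: Python's f"{n:02d}" — zero-pad to width 2 (exact for |n| < 100, the only uses here)
def pvFmt02 (n : Int) : String :=
  let s := PySem.Int.toStr n
  if s.toList.length < 2 then "0" ++ s else s

-- literal port of A: single forward loop over months 1..12 with the wraparound conditional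
def monthly_partitions_py (year : Int) : List (String × String × String) :=
  (PySem.List.pyRange 1 13 1).foldl (fun partitions month =>
    let next_month := month + 1
    let next_year := year
    let nm_ny : Int × Int := if next_month > 12 then (1, year + 1) else (next_month, next_year)
    let name := "activity_logs_y" ++ PySem.Int.toStr year ++ "m" ++ pvFmt02 month
    let from_date := PySem.Int.toStr year ++ "-" ++ pvFmt02 month ++ "-01"
    let to_date := PySem.Int.toStr nm_ny.2 ++ "-" ++ pvFmt02 nm_ny.1 ++ "-01"
    partitions ++ [(name, from_date, to_date)]) []

-- ===== PORT B =====
-- port of B's recursive helper: month counts down, `upper` carries the next month's start date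
def pvBuild (year : Int) : Nat → String → List (String × String × String) → List (String × String × String)
  | 0, _, acc => acc
  | m + 1, upper, acc =>
    let month : Int := (m + 1 : Nat)
    let start := PySem.Int.toStr year ++ "-" ++ pvFmt02 month ++ "-01"
    let entry := ("activity_logs_y" ++ PySem.Int.toStr year ++ "m" ++ pvFmt02 month, start, upper)
    pvBuild year m start ([entry] ++ acc)

-- port of B: backward recursion from month 12 with the year+1 January boundary as initial upper
def monthly_partitions_py_alt (year : Int) : List (String × String × String) :=
  pvBuild year 12 (PySem.Int.toStr (year + 1) ++ "-01-01") []

-- ===== PRECONDITION & SPEC =====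
def Spec_monthly_partitions_py (year : Int) (out : List (String × String × String)) : Prop := out = monthly_partitions_py_alt year
instance (year : Int) (out : List (String × String × String)) : Decidable (Spec_monthly_partitions_py year out) := by unfold Spec_monthly_partitions_py; infer_instance

-- ===== CLAIM (what is proved, stated in full; the proofs are below) =====
def Claim_equal_monthly_partitions_py : Prop := ∀ (year : Int), Dom_monthly_partitions_py year → Spec_monthly_partitions_py year (monthly_partitions_py year)

-- ===== LEMMAS AND PROOFS =====

-- ===== VERDICT (by name: the statement is the Claim_ definition above) =====
theorem monthly_partitions_py_spec : Claim_equal_monthly_partitions_py := by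
  intro year _
  unfold Spec_monthly_partitions_py monthly_partitions_py monthly_partitions_py_alt
  have h01 : pvFmt02 1 = "01" := by decide
  have h02 : pvFmt02 2 = "02" := by decide
  have h03 : pvFmt02 3 = "03" := by decide
  have h04 : pvFmt02 4 = "04" := by decide
  have h05 : pvFmt02 5 = "05" := by decide
  have h06 : pvFmt02 6 = "06" := by decide
  have h07 : pvFmt02 7 = "07" := by decide
  have h08 : pvFmt02 8 = "08" := by decide
  have h09 : pvFmt02 9 = "09" := by decide
  have h10 : pvFmt02 10 = "10" := by decide
  have h11 : pvFmt02 11 = "11" := by decide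
  have h12 : pvFmt02 12 = "12" := by decide
  simp [PySem.List.pyRange, pvBuild, List.range_succ, h01, h02, h03, h04, h05, h06, h07, h08, h09, h10, h11, h12, String.append_assoc]
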